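-- pv_equiv track=rewrite | github.com/Cold-phiz/Resumegit | downloads/album_downloader.py | replace_slash_backslash_in_list
-- ===== SOURCE A (Python) =====
-- def replace_slash_backslash_in_list(song_names):
--     modified_list = []
--
--     for item in song_names:
--         # Replace "/" with "-"
--         modified_item = item.replace("/", "-")
--         # Replace "\" with "-"
--         modified_item = modified_item.replace("\\", "-")
--         modified_list.append(modified_item)
--
--     song_names = modified_list
--
--     return song_names
-- ===== SOURCE B (Python) =====
-- def replace_slash_backslash_in_list(song_names):
--     # Cut each name into segments at '/' or '\' and reassemble with '-' between
--     # the segments, instead of replacing characters in place.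
--     result = []
--     for item in song_names:
--         parts = []
--         buf = []
--         for ch in item:
--             if ch == '/' or ch == '\\':
--                 parts.append(''.join(buf))
--                 buf = []
--             else:
--                 buf.append(ch)
--         parts.append(''.join(buf))
--         result.append('-'.join(parts))
--     return result
-- ===== Notes on version B (the rewrite author's own statement) =====
-- stated objective: alternative
-- what changed: Instead of two sequential str.replace passes per element, B cuts each string into the segments between '/' and '\' occurrences (maintaining a segment list and a character buffer in one scan) and reassembles them with '-'.join, a split-and-rejoin algorithm that never performs a replacement.
import Mathlib
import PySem

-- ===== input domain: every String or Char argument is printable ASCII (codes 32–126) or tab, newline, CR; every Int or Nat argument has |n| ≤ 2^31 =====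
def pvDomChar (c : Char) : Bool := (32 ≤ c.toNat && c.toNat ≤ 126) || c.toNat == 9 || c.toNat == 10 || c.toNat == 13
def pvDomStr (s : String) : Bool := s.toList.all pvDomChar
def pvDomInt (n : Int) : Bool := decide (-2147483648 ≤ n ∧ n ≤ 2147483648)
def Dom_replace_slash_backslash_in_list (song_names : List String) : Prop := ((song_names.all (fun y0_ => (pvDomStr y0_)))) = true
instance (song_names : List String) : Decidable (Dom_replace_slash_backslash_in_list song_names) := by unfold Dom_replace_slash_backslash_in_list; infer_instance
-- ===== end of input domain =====

-- B cuts each name into the segments between '/' and '\' occurrences in one scan and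
-- reassembles them with '-'.join, instead of A's two sequential .replace passes (alternative).

-- ===== PORT A =====
def replace_slash_backslash_in_list (song_names : List String) : List String :=
  let modified_list :=
    song_names.foldl (fun acc item =>
      let modified_item := PySem.Str.replace item "/" "-"
      let modified_item := PySem.Str.replace modified_item "\\" "-"
      acc ++ [modified_item]) []
  modified_list

-- ===== PORT B =====
-- the inner for-loop over the characters: state (parts, buf)
def pvCutStep (st : List String × List Char) (ch : Char) : List String × List Char :=
  if ch = '/' ∨ ch = '\\' then (st.1 ++ [String.ofList st.2], [])
  else (st.1, st.2 ++ [ch])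

def replace_slash_backslash_in_list_alt (song_names : List String) : List String :=
  song_names.foldl (fun result item =>
    let st := item.toList.foldl pvCutStep ([], [])
    let parts := st.1 ++ [String.ofList st.2]
    result ++ [PySem.Str.join "-" parts]) []

-- ===== PRECONDITION & SPEC =====
def Spec_replace_slash_backslash_in_list (song_names : List String) (out : List String) : Prop := out = replace_slash_backslash_in_list_alt song_names
instance (song_names : List String) (out : List String) : Decidable (Spec_replace_slash_backslash_in_list song_names out) := by unfold Spec_replace_slash_backslash_in_list; infer_instance

-- ===== CLAIM (what is proved, stated in full; the proofs are below) =====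
def Claim_equal_replace_slash_backslash_in_list : Prop := ∀ (song_names : List String), Dom_replace_slash_backslash_in_list song_names → Spec_replace_slash_backslash_in_list song_names (replace_slash_backslash_in_list song_names)

-- ===== LEMMAS AND PROOFS =====

-- the character map the two .replace passes of A amount to
def pvF (c : Char) : Char := if c = '/' ∨ c = '\\' then '-' else c

-- replacing a single character by a single character is a character map
theorem chars_replace_single (a b : Char) (l : List Char) :
    PySem.Chars.replace l [a] [b] = l.map (fun c => if c = a then b else c) := by
  have go : ∀ (l : List Char) (acc : List Char),
      PySem.Chars.replace.go [a] [b] l.length l acc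
        = acc.reverse ++ l.map (fun c => if c = a then b else c) := by
    intro l
    induction l with
    | nil => intro acc; simp [PySem.Chars.replace.go]
    | cons c t ih =>
      intro acc
      simp only [List.length_cons, PySem.Chars.replace.go, List.map_cons]
      by_cases h : c = a
      · simp [h, ih]
      · have hp : [a].isPrefixOf (c :: t) = false := by
          simp [List.isPrefixOf]
          exact fun he => h he.symm
        simp [hp, h, ih]
  simp [PySem.Chars.replace, go]

-- A's per-item value, at the character level, is the map of pvF
theorem a_item_chars (item : String) :
    (PySem.Str.replace (PySem.Str.replace item "/" "-") "\\" "-").toList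
      = item.toList.map pvF := by
  have h1 : ("/" : String).toList = ['/'] := rfl
  have h2 : ("\\" : String).toList = ['\\'] := rfl
  have h3 : ("-" : String).toList = ['-'] := rfl
  simp only [PySem.Str.toList_replace, h1, h2, h3, chars_replace_single, List.map_map]
  apply List.map_congr_left
  intro c _
  by_cases hc1 : c = '/'
  · simp [hc1, pvF]
  · by_cases hc2 : c = '\\'
    · simp [hc2, pvF]
    · simp [pvF, hc1, hc2]

-- abbreviation used only in the proofs: join with a single dash
def pvJ (xs : List (List Char)) : List Char := PySem.Chars.join ['-'] xs

theorem pvJ_cons (x : List Char) (l : List (List Char)) (h : l ≠ []) :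
    pvJ (x :: l) = x ++ ['-'] ++ pvJ l := by
  cases l with
  | nil => exact absurd rfl h
  | cons u v => exact PySem.Chars.join_cons_cons ..

theorem pvJ_snoc_append (y z : List Char) : ∀ (xs : List (List Char)),
    pvJ (xs ++ [y ++ z]) = pvJ (xs ++ [y]) ++ z := by
  intro xs
  induction xs with
  | nil => simp [pvJ, PySem.Chars.join_singleton]
  | cons x t ih =>
    rw [List.cons_append, List.cons_append,
      pvJ_cons x (t ++ [y ++ z]) (by simp), pvJ_cons x (t ++ [y]) (by simp), ih]
    simp [List.append_assoc]

theorem pvJ_snoc_nil (y : List Char) : ∀ (xs : List (List Char)),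
    pvJ (xs ++ [y] ++ [[]]) = pvJ (xs ++ [y]) ++ ['-'] := by
  intro xs
  induction xs with
  | nil => simp [pvJ, PySem.Chars.join_singleton, PySem.Chars.join_cons_cons]
  | cons x t ih =>
    rw [show x :: t ++ [y] ++ [[]] = x :: (t ++ [y] ++ [[]]) by simp,
      show x :: t ++ [y] = x :: (t ++ [y]) from List.cons_append ..,
      pvJ_cons x (t ++ [y] ++ [[]]) (by simp), pvJ_cons x (t ++ [y]) (by simp), ih]
    simp [List.append_assoc]

-- loop invariant of B's inner scan: joining the current segments (plus buffer)
-- with dashes extends by the mapped remaining characters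
theorem cut_invariant : ∀ (l : List Char) (parts : List String) (buf : List Char),
    pvJ (((l.foldl pvCutStep (parts, buf)).1.map String.toList)
          ++ [(l.foldl pvCutStep (parts, buf)).2])
      = pvJ ((parts.map String.toList) ++ [buf]) ++ l.map pvF := by
  intro l
  induction l with
  | nil => intro parts buf; simp
  | cons c t ih =>
    intro parts buf
    simp only [List.foldl_cons, List.map_cons]
    by_cases h : c = '/' ∨ c = '\\'
    · have hs : pvCutStep (parts, buf) c = (parts ++ [String.ofList buf], []) := by
        simp [pvCutStep, h]
      rw [hs, ih]
      have : ((parts ++ [String.ofList buf]).map String.toList) ++ [([] : List Char)]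
            = ((parts.map String.toList) ++ [buf]) ++ [([] : List Char)] := by
        simp [String.toList_ofList]
      rw [this, pvJ_snoc_nil buf (parts.map String.toList)]
      simp [pvF, h, List.append_assoc]
    · have hs : pvCutStep (parts, buf) c = (parts, buf ++ [c]) := by
        simp [pvCutStep, h]
      rw [hs, ih, pvJ_snoc_append buf [c]]
      simp [pvF, h, List.append_assoc]

-- B's per-item value, at the character level, is also the map of pvF
theorem b_item_chars (item : String) :
    (PySem.Str.join "-"
        ((item.toList.foldl pvCutStep ([], [])).1 ++
          [String.ofList (item.toList.foldl pvCutStep ([], [])).2])).toList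
      = item.toList.map pvF := by
  rw [PySem.Str.toList_join]
  have hsep : ("-" : String).toList = ['-'] := rfl
  have := cut_invariant item.toList [] []
  simp only [List.map_nil, List.nil_append] at this
  simp only [hsep, List.map_append, List.map_cons, List.map_nil, String.toList_ofList]
  calc PySem.Chars.join ['-']
        (((item.toList.foldl pvCutStep ([], [])).1.map String.toList)
          ++ [(item.toList.foldl pvCutStep ([], [])).2])
      = pvJ ([([] : List Char)]) ++ item.toList.map pvF := this
    _ = item.toList.map pvF := by simp [pvJ, PySem.Chars.join_singleton]

theorem foldl_append_map {α β : Type} (f : α → β) :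
    ∀ (xs : List α) (acc : List β),
      List.foldl (fun acc item => acc ++ [f item]) acc xs = acc ++ xs.map f := by
  intro xs
  induction xs with
  | nil => intro acc; simp
  | cons x t ih => intro acc; simp [ih]

-- ===== VERDICT (by name: the statement is the Claim_ definition above) =====
theorem replace_slash_backslash_in_list_spec : Claim_equal_replace_slash_backslash_in_list := by
  intro song_names _
  unfold Spec_replace_slash_backslash_in_list replace_slash_backslash_in_list
      replace_slash_backslash_in_list_alt
  simp only [foldl_append_map, List.nil_append]
  apply List.map_congr_left
  intro item _
  apply String.toList_injective
  rw [a_item_chars, b_item_chars]
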